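-- pv_equiv track=rewrite | github.com/vishalbelsare/memori | memori/database/adapters/mysql_adapter.py | translate_search_query
-- ===== SOURCE A (Python) =====
-- def translate_search_query(query: str) -> str:
--     """Translate search query to MySQL FULLTEXT boolean syntax"""
--     if not query or not query.strip():
--         return ""
--
--     # Sanitize input for MySQL FULLTEXT
--     sanitized = query.strip()
--
--     # Remove potentially dangerous boolean operators (use phrase search instead)
--     dangerous_operators = ["+", "-", "~", "*", '"', "(", ")", "<", ">"]
--     for op in dangerous_operators:
--         sanitized = sanitized.replace(op, " ")
--
--     # Split into words and prepare for boolean mode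
--     words = [
--         word.strip()
--         for word in sanitized.split()
--         if word.strip() and len(word) >= 3
--     ]  # MySQL ft_min_word_len
--
--     if not words:
--         return ""
--
--     # Use phrase search for safety (wrap in quotes)
--     return f'"{" ".join(words)}"'
-- ===== SOURCE B (Python) =====
-- def translate_search_query(query: str) -> str:
--     """Translate search query to MySQL FULLTEXT boolean syntax (single-pass tokenizer)."""
--     delims = '+-~*"()<> \t\n\r\x0b\x0c'
--     words = []
--     cur = []
--     for ch in query:
--         if ch in delims:
--             if len(cur) >= 3:
--                 words.append(''.join(cur))
--             cur = []
--         else: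
--             cur.append(ch)
--     if len(cur) >= 3:
--         words.append(''.join(cur))
--     if not words:
--         return ''
--     return '"' + ' '.join(words) + '"'
-- ===== Notes on version B (the rewrite author's own statement) =====
-- stated objective: alternative
-- what changed: A makes nine full replace() passes to blank out dangerous operators and then a split() pass plus per-word strip(); B tokenizes the string in a single left-to-right scan with a current-word accumulator, treating operators and whitespace uniformly as delimiters.
import Mathlib
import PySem

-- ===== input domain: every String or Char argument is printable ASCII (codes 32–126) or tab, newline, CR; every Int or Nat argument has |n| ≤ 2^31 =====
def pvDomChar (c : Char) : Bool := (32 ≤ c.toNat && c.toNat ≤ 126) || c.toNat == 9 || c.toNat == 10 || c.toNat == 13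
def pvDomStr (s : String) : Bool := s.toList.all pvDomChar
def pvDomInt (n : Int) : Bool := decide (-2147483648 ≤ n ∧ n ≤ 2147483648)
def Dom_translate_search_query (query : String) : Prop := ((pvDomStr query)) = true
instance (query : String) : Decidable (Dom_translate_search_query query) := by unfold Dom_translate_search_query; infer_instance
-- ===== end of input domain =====

-- B replaces A's nine full replace() passes plus a split() pass by a single left-to-right scan
-- of the characters with a current-word accumulator (objective: alternative single-pass algorithm).

-- ===== PORT A =====
def pvDangerousOps : List (List Char) := [['+'], ['-'], ['~'], ['*'], ['"'], ['('], [')'], ['<'], ['>']]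

def translate_search_query (query : String) : String :=
  if query.toList = [] ∨ PySem.Chars.strip query.toList = [] then "" else
    let sanitized := PySem.Chars.strip query.toList
    let sanitized := pvDangerousOps.foldl (fun s op => PySem.Chars.replace s op [' ']) sanitized
    let words := ((PySem.Chars.split₀ sanitized).filter
        (fun w => !(PySem.Chars.strip w).isEmpty && decide (3 ≤ w.length))).map PySem.Chars.strip
    if words = [] then "" else
      String.ofList ('"' :: (PySem.Chars.join [' '] words ++ ['"']))

-- ===== PORT B =====
def pvDelims : List Char := ['+', '-', '~', '*', '"', '(', ')', '<', '>', ' ', '\t', '\n', '\r', '\x0B', '\x0C']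

def pvStep (st : List (List Char) × List Char) (c : Char) : List (List Char) × List Char :=
  if pvDelims.contains c then
    (if 3 ≤ st.2.length then st.1 ++ [st.2] else st.1, [])
  else
    (st.1, st.2 ++ [c])

def translate_search_query_alt (query : String) : String :=
  let st := query.toList.foldl pvStep ([], [])
  let words := if 3 ≤ st.2.length then st.1 ++ [st.2] else st.1
  if words = [] then "" else
    String.ofList ('"' :: (PySem.Chars.join [' '] words ++ ['"']))

-- ===== PRECONDITION & SPEC =====
def Spec_translate_search_query (query : String) (out : String) : Prop := out = translate_search_query_alt query
instance (query : String) (out : String) : Decidable (Spec_translate_search_query query out) := by unfold Spec_translate_search_query; infer_instance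

-- ===== CLAIM (what is proved, stated in full; the proofs are below) =====
def Claim_equal_translate_search_query : Prop := ∀ (query : String), Dom_translate_search_query query → Spec_translate_search_query query (translate_search_query query)

-- ===== LEMMAS AND PROOFS =====

-- the character map A's nine single-character replace passes amount to
def pvSubst (c : Char) : Char :=
  if ['+', '-', '~', '*', '"', '(', ')', '<', '>'].contains c then ' ' else c

-- B's final flush of the scan state
def pvFlush (st : List (List Char) × List Char) : List (List Char) :=
  if 3 ≤ st.2.length then st.1 ++ [st.2] else st.1

lemma pvCharEq (a b : Char) : (a = b) ↔ (a.toNat = b.toNat) :=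
  ⟨fun h => by rw [h], fun h => Char.ext (UInt32.toNat_inj.mp h)⟩

lemma pvReplaceGo (a b : Char) :
    ∀ (l : List Char) (fuel : Nat) (acc : List Char), l.length ≤ fuel →
      PySem.Chars.replace.go [a] [b] fuel l acc
        = acc.reverse ++ l.map (fun c => if c = a then b else c) := by
  intro l
  induction l with
  | nil =>
    intro fuel acc _
    cases fuel <;> simp [PySem.Chars.replace.go]
  | cons c t ih =>
    intro fuel acc hle
    cases fuel with
    | zero => simp at hle
    | succ n =>
      simp only [List.length_cons, Nat.add_le_add_iff_right] at hle
      by_cases hca : a = c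
      · subst hca
        simp [PySem.Chars.replace.go, List.isPrefixOf, ih _ _ hle]
      · simp [PySem.Chars.replace.go, List.isPrefixOf, Ne.symm hca, hca,
          ih _ _ hle, beq_iff_eq]

lemma pvReplaceSingle (a b : Char) (s : List Char) :
    PySem.Chars.replace s [a] [b] = s.map (fun c => if c = a then b else c) := by
  simp [PySem.Chars.replace, pvReplaceGo a b s s.length [] le_rfl]

lemma pvSanitizeMap (s : List Char) :
    pvDangerousOps.foldl (fun s op => PySem.Chars.replace s op [' ']) s = s.map pvSubst := by
  simp only [pvDangerousOps, List.foldl_cons, List.foldl_nil, pvReplaceSingle, List.map_map]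
  apply List.map_congr_left
  intro c _
  by_cases h : (['+', '-', '~', '*', '"', '(', ')', '<', '>'] : List Char).contains c
  · simp only [List.contains_cons, List.contains_nil, beq_iff_eq, Bool.or_eq_true,
      Bool.false_eq_true, or_false] at h
    rcases h with h | h | h | h | h | h | h | h | h <;> subst h <;> decide
  · simp only [List.contains_cons, List.contains_nil, beq_iff_eq, Bool.or_eq_true,
      Bool.false_eq_true, or_false, not_or] at h
    obtain ⟨h1, h2, h3, h4, h5, h6, h7, h8, h9⟩ := h
    simp [Function.comp, pvSubst, h1, h2, h3, h4, h5, h6, h7, h8, h9]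

lemma pvCharFact (c : Char) (hc : pvDomChar c = true) :
    pvDelims.contains c = PySem.Chars.isspace (pvSubst c) := by
  by_cases hd : (['+', '-', '~', '*', '"', '(', ')', '<', '>'] : List Char).contains c
  · simp only [List.contains_cons, List.contains_nil, beq_iff_eq, Bool.or_eq_true,
      Bool.false_eq_true, or_false] at hd
    rcases hd with h | h | h | h | h | h | h | h | h <;> subst h <;> decide
  · have hs : pvSubst c = c := by unfold pvSubst; rw [if_neg hd]
    rw [hs, Bool.eq_iff_iff]
    simp only [pvDomChar, Bool.or_eq_true, Bool.and_eq_true, decide_eq_true_eq,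
      beq_iff_eq] at hc
    simp only [pvDelims, PySem.Chars.isspace, List.contains_cons, List.contains_nil,
      Bool.or_eq_true, Bool.and_eq_true, beq_iff_eq, decide_eq_true_eq,
      Bool.false_eq_true, or_false, pvCharEq,
      show ('+' : Char).toNat = 43 from rfl, show ('-' : Char).toNat = 45 from rfl,
      show ('~' : Char).toNat = 126 from rfl, show ('*' : Char).toNat = 42 from rfl,
      show ('"' : Char).toNat = 34 from rfl, show ('(' : Char).toNat = 40 from rfl,
      show (')' : Char).toNat = 41 from rfl, show ('<' : Char).toNat = 60 from rfl,
      show ('>' : Char).toNat = 62 from rfl, show (' ' : Char).toNat = 32 from rfl,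
      show ('\t' : Char).toNat = 9 from rfl, show ('\n' : Char).toNat = 10 from rfl,
      show ('\r' : Char).toNat = 13 from rfl, show ('\x0B' : Char).toNat = 11 from rfl,
      show ('\x0C' : Char).toNat = 12 from rfl]
    simp only [List.contains_cons, List.contains_nil, beq_iff_eq, Bool.or_eq_true,
      Bool.false_eq_true, or_false, pvCharEq,
      show ('+' : Char).toNat = 43 from rfl, show ('-' : Char).toNat = 45 from rfl,
      show ('~' : Char).toNat = 126 from rfl, show ('*' : Char).toNat = 42 from rfl,
      show ('"' : Char).toNat = 34 from rfl, show ('(' : Char).toNat = 40 from rfl,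
      show (')' : Char).toNat = 41 from rfl, show ('<' : Char).toNat = 60 from rfl,
      show ('>' : Char).toNat = 62 from rfl] at hd
    omega

lemma pvSubstId (c : Char) (h : pvDelims.contains c = false) : pvSubst c = c := by
  unfold pvSubst
  rw [if_neg]
  intro hd
  simp only [List.contains_cons, List.contains_nil, beq_iff_eq, Bool.or_eq_true,
    Bool.false_eq_true, or_false] at hd
  rcases hd with h' | h' | h' | h' | h' | h' | h' | h' | h' <;> subst h' <;> simp [pvDelims] at h

lemma pvSpaceSubst (c : Char) (h : PySem.Chars.isspace c = true) :
    PySem.Chars.isspace (pvSubst c) = true := by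
  unfold pvSubst
  split
  · decide
  · exact h

lemma pvGoMem :
    ∀ (s cur : List Char) (acc : List (List Char)),
      (∀ c ∈ cur, PySem.Chars.isspace c = false) →
      (∀ w ∈ acc, w ≠ [] ∧ ∀ c ∈ w, PySem.Chars.isspace c = false) →
      ∀ w ∈ PySem.Chars.split₀.go s cur acc, w ≠ [] ∧ ∀ c ∈ w, PySem.Chars.isspace c = false := by
  intro s
  induction s with
  | nil =>
    intro cur acc hcur hacc w hw
    simp only [PySem.Chars.split₀.go] at hw
    split at hw
    · exact hacc w (by simpa using hw)
    · rename_i hne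
      simp only [List.mem_reverse, List.mem_cons] at hw
      rcases hw with h | h
      · subst h
        refine ⟨by simpa using hne, ?_⟩
        intro c hc
        exact hcur c (by simpa using hc)
      · exact hacc w h
  | cons a t ih =>
    intro cur acc hcur hacc w hw
    simp only [PySem.Chars.split₀.go] at hw
    by_cases hsp : PySem.Chars.isspace a = true
    · rw [if_pos hsp] at hw
      split at hw
      · exact ih [] acc (by simp) hacc w hw
      · rename_i hne
        refine ih [] _ (by simp) ?_ w hw
        intro v hv
        rcases List.mem_cons.mp hv with h | h
        · subst h
          refine ⟨by simpa using hne, ?_⟩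
          intro c hc
          exact hcur c (by simpa using hc)
        · exact hacc v h
    · rw [if_neg hsp] at hw
      refine ih (a :: cur) acc ?_ hacc w hw
      intro c hc
      rcases List.mem_cons.mp hc with h | h
      · subst h; simpa using hsp
      · exact hcur c h

lemma pvStripNoWs (w : List Char) (h : ∀ c ∈ w, PySem.Chars.isspace c = false) :
    PySem.Chars.strip w = w := by
  unfold PySem.Chars.strip PySem.Chars.lstrip PySem.Chars.rstrip
  rw [List.dropWhile_eq_self_iff.mpr, List.dropWhile_eq_self_iff.mpr, List.reverse_reverse]
  · intro hl
    simp [h _ (List.getElem_mem hl)]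
  · intro hl
    have hm : (List.dropWhile PySem.Chars.isspace w).reverse[0] ∈ w := by
      have := List.getElem_mem hl
      rw [List.mem_reverse] at this
      exact List.dropWhile_subset _ this
    rw [h _ hm]
    simp

lemma pvMain :
    ∀ (l rcur : List Char) (acc : List (List Char)),
      (∀ c ∈ l, pvDomChar c = true) →
      (PySem.Chars.split₀.go (l.map pvSubst) rcur acc).filter (fun w => decide (3 ≤ w.length))
        = pvFlush (l.foldl pvStep (acc.reverse.filter (fun w => decide (3 ≤ w.length)), rcur.reverse)) := by
  intro l
  induction l with
  | nil =>
    intro rcur acc _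
    simp only [List.map_nil, PySem.Chars.split₀.go, List.foldl_nil, pvFlush]
    split
    · rename_i hemp
      simp only [List.isEmpty_iff] at hemp
      subst hemp
      simp
    · rename_i hemp
      simp only [List.isEmpty_iff] at hemp
      rw [List.reverse_cons, List.filter_append]
      by_cases h3 : 3 ≤ rcur.length
      · rw [if_pos (by simpa using h3)]
        simp [h3]
      · rw [if_neg (by simpa using h3)]
        simp [h3]
  | cons c t ih =>
    intro rcur acc hdom
    have hc := hdom c List.mem_cons_self
    have ht : ∀ c ∈ t, pvDomChar c = true := fun x hx => hdom x (List.mem_cons_of_mem _ hx)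
    simp only [List.map_cons, PySem.Chars.split₀.go, List.foldl_cons]
    by_cases hdel : pvDelims.contains c = true
    · have hsp : PySem.Chars.isspace (pvSubst c) = true := by rw [← pvCharFact c hc]; exact hdel
      rw [if_pos hsp]
      have hstep : pvStep (acc.reverse.filter (fun w => decide (3 ≤ w.length)), rcur.reverse) c
          = (if 3 ≤ rcur.length then acc.reverse.filter (fun w => decide (3 ≤ w.length)) ++ [rcur.reverse]
             else acc.reverse.filter (fun w => decide (3 ≤ w.length)), []) := by
        have hmem : c ∈ pvDelims := by simpa using hdel
        simp [pvStep, hmem]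
      rw [hstep]
      by_cases hemp : rcur = []
      · subst hemp
        rw [if_pos (by simp)]
        have := ih [] acc ht
        simpa using this
      · rw [if_neg (by simpa using hemp)]
        have := ih [] (rcur.reverse :: acc) ht
        simp only [List.reverse_nil] at this ⊢
        rw [this]
        rw [List.reverse_cons, List.filter_append]
        by_cases h3 : 3 ≤ rcur.length
        · simp [h3]
        · simp [h3]
    · have hne : pvDelims.contains c = false := by simpa using hdel
      have hsp : ¬ PySem.Chars.isspace (pvSubst c) = true := by
        rw [← pvCharFact c hc]; simpa using hne
      rw [if_neg hsp, pvSubstId c hne]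
      have hstep : pvStep (acc.reverse.filter (fun w => decide (3 ≤ w.length)), rcur.reverse) c
          = (acc.reverse.filter (fun w => decide (3 ≤ w.length)), rcur.reverse ++ [c]) := by
        have hmem : c ∉ pvDelims := by simpa using hne
        simp [pvStep, hmem]
      rw [hstep]
      have := ih (c :: rcur) acc ht
      simpa using this

lemma pvStays (w : List Char) (ws : List (List Char)) (h : ∀ c ∈ w, pvDelims.contains c = true) :
    w.foldl pvStep (ws, []) = (ws, []) := by
  induction w with
  | nil => rfl
  | cons c t ih =>
    have hmem : c ∈ pvDelims := by simpa using h c List.mem_cons_self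
    simp only [List.foldl_cons, pvStep, List.contains_iff_mem, hmem, if_true]
    simp only [List.length_nil, show ¬ (3 ≤ 0) by omega, if_false]
    exact ih (fun x hx => h x (List.mem_cons_of_mem _ hx))

lemma pvTrailing (w : List Char) (st : List (List Char) × List Char)
    (h : ∀ c ∈ w, pvDelims.contains c = true) :
    pvFlush (w.foldl pvStep st) = pvFlush st := by
  induction w generalizing st with
  | nil => rfl
  | cons c t ih =>
    have hst : pvStep st c = (pvFlush st, []) := by
      have hmem : c ∈ pvDelims := by simpa using h c List.mem_cons_self
      simp [pvStep, pvFlush, hmem]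
    rw [List.foldl_cons, hst, ih _ (fun x hx => h x (List.mem_cons_of_mem _ hx))]
    simp [pvFlush]

lemma pvStripDecomp (l : List Char) :
    l = l.takeWhile PySem.Chars.isspace ++ PySem.Chars.strip l
          ++ ((PySem.Chars.lstrip l).reverse.takeWhile PySem.Chars.isspace).reverse := by
  unfold PySem.Chars.strip PySem.Chars.rstrip PySem.Chars.lstrip
  conv_lhs => rw [← List.takeWhile_append_dropWhile (p := PySem.Chars.isspace) (l := l)]
  rw [List.append_assoc]
  congr 1
  have : List.dropWhile PySem.Chars.isspace l
      = ((List.dropWhile PySem.Chars.isspace l).reverse.takeWhile PySem.Chars.isspace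
          ++ (List.dropWhile PySem.Chars.isspace l).reverse.dropWhile PySem.Chars.isspace).reverse := by
    rw [List.takeWhile_append_dropWhile, List.reverse_reverse]
  conv_lhs => rw [this]
  rw [List.reverse_append]

-- ===== VERDICT (by name: the statement is the Claim_ definition above) =====
theorem translate_search_query_spec : Claim_equal_translate_search_query := by
  intro query hdom
  unfold Spec_translate_search_query
  have hall : ∀ c ∈ query.toList, pvDomChar c = true := by
    simpa [Dom_translate_search_query, pvDomStr, List.all_eq_true] using hdom
  have hwsdel : ∀ c ∈ query.toList, PySem.Chars.isspace c = true → pvDelims.contains c = true := by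
    intro c hc hsp
    rw [pvCharFact c (hall c hc)]
    exact pvSpaceSubst c hsp
  by_cases hemp : (query.toList = [] ∨ PySem.Chars.strip query.toList = [])
  · have hstripnil : PySem.Chars.strip query.toList = [] := by
      rcases hemp with h | h
      · rw [h]; rfl
      · exact h
    have hallsp : ∀ c ∈ query.toList, PySem.Chars.isspace c = true := by
      intro c hc
      rw [pvStripDecomp query.toList, hstripnil] at hc
      simp only [List.append_nil, List.mem_append, List.mem_reverse] at hc
      rcases hc with h | h
      · exact List.mem_takeWhile_imp h
      · exact List.mem_takeWhile_imp h
    have halldel : ∀ c ∈ query.toList, pvDelims.contains c = true :=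
      fun c hc => hwsdel c hc (hallsp c hc)
    unfold translate_search_query translate_search_query_alt
    rw [if_pos hemp, pvStays _ _ halldel]
    simp
  · have hsubql : ∀ c ∈ PySem.Chars.strip query.toList, c ∈ query.toList := by
      intro c hc
      rw [pvStripDecomp query.toList]
      simp only [List.mem_append]
      exact Or.inl (Or.inr hc)
    have hdomS : ∀ c ∈ PySem.Chars.strip query.toList, pvDomChar c = true :=
      fun c hc => hall c (hsubql c hc)
    have hmem := pvGoMem ((PySem.Chars.strip query.toList).map pvSubst) [] [] (by simp) (by simp)
    have hsplit : PySem.Chars.split₀ ((PySem.Chars.strip query.toList).map pvSubst)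
        = PySem.Chars.split₀.go ((PySem.Chars.strip query.toList).map pvSubst) [] [] := rfl
    have hfilter : (PySem.Chars.split₀ ((PySem.Chars.strip query.toList).map pvSubst)).filter
          (fun w => !(PySem.Chars.strip w).isEmpty && decide (3 ≤ w.length))
        = (PySem.Chars.split₀ ((PySem.Chars.strip query.toList).map pvSubst)).filter
          (fun w => decide (3 ≤ w.length)) := by
      apply List.filter_congr
      intro w hw
      obtain ⟨hne, hnw⟩ := hmem w (by rw [← hsplit]; exact hw)
      rw [pvStripNoWs w hnw]
      simp [hne]
    have hmap : ((PySem.Chars.split₀ ((PySem.Chars.strip query.toList).map pvSubst)).filter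
          (fun w => decide (3 ≤ w.length))).map PySem.Chars.strip
        = (PySem.Chars.split₀ ((PySem.Chars.strip query.toList).map pvSubst)).filter
          (fun w => decide (3 ≤ w.length)) := by
      rw [List.map_congr_left (g := id), List.map_id]
      intro w hw
      exact pvStripNoWs w (hmem w (by rw [← hsplit]; exact List.mem_of_mem_filter hw)).2
    have hmain := pvMain (PySem.Chars.strip query.toList) [] [] hdomS
    simp only [List.reverse_nil, List.filter_nil] at hmain
    have htw : ∀ c ∈ query.toList.takeWhile PySem.Chars.isspace, pvDelims.contains c = true := by
      intro c hc
      have hcl : c ∈ query.toList := List.takeWhile_subset _ hc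
      exact hwsdel c hcl (List.mem_takeWhile_imp hc)
    have hrw : ∀ c ∈ ((PySem.Chars.lstrip query.toList).reverse.takeWhile PySem.Chars.isspace).reverse,
        pvDelims.contains c = true := by
      intro c hc
      rw [List.mem_reverse] at hc
      have hcl : c ∈ query.toList := by
        have h1 : c ∈ (PySem.Chars.lstrip query.toList).reverse := List.takeWhile_subset _ hc
        rw [List.mem_reverse] at h1
        exact List.dropWhile_subset _ h1
      exact hwsdel c hcl (List.mem_takeWhile_imp hc)
    have hfold : pvFlush (query.toList.foldl pvStep ([], []))
        = pvFlush ((PySem.Chars.strip query.toList).foldl pvStep ([], [])) := by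
      conv_lhs => rw [pvStripDecomp query.toList]
      rw [List.foldl_append, List.foldl_append, pvStays _ _ htw, pvTrailing _ _ hrw]
    unfold translate_search_query translate_search_query_alt
    rw [if_neg hemp]
    simp only [pvSanitizeMap, hfilter, hmap]
    rw [hsplit, hmain]
    rw [show (if 3 ≤ (query.toList.foldl pvStep ([], [])).2.length
          then (query.toList.foldl pvStep ([], [])).1 ++ [(query.toList.foldl pvStep ([], [])).2]
          else (query.toList.foldl pvStep ([], [])).1)
        = pvFlush (query.toList.foldl pvStep ([], [])) from rfl, hfold]
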